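-- pv_equiv track=rewrite | github.com/mounikayacham/solvedProblems | Difficulty: Basic/Palindromic Array/palindromic-array.py | isPalinArray
-- ===== SOURCE A (Python) =====
-- def isPalinArray(arr):
--     # Code here
--     for i in range(len(arr)):
--         n=arr[i]
--         r=0
--         k=arr[i]
--         while n>0:
--             p=n%10
--             r=r*10+p
--             n=n//10
--         if k!=r:
--             return False
--     return True
-- ===== SOURCE B (Python) =====
-- def isPalinArray(arr):
--     return all(str(x) == str(x)[::-1] for x in arr)
-- ===== Notes on version B (the rewrite author's own statement) =====
-- stated objective: idiomatic
-- what changed: Replaces the per-element arithmetic digit-reversal while-loop (and index loop with early return) with a single all() over the list testing each element's decimal string against its reverse.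
import Mathlib
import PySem

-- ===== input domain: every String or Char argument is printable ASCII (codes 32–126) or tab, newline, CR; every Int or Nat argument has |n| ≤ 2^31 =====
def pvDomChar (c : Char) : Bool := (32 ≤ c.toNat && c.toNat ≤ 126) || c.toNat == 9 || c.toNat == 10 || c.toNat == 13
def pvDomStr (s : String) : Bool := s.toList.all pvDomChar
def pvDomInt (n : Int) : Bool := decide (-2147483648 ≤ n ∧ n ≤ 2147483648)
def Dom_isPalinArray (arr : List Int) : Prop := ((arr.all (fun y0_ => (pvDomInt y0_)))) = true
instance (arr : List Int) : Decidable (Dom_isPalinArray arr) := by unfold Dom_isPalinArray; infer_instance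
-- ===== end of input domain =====

-- B replaces A's arithmetic digit-reversal inner while-loop with the idiomatic
-- all(str(x) == str(x)[::-1]); string equality is ported on the char-list side (exact).

-- ===== PORT A =====
-- the inner 'while n>0: p=n%10; r=r*10+p; n=n//10' loop
def revA (n r : Int) : Int :=
  if 0 < n then revA (PySem.Int.floordiv n 10) (r * 10 + PySem.Int.mod n 10) else r
termination_by n.toNat
decreasing_by
  rename_i h
  rw [PySem.Int.floordiv_eq_ediv_of_pos (by omega)]
  omega

-- 'for i in range(len(arr)): … if k != r: return False' / 'return True' as structural recursion
def isPalinArray (arr : List Int) : Bool :=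
  match arr with
  | [] => true
  | x :: rest => if x ≠ revA x 0 then false else isPalinArray rest

-- ===== PORT B =====
-- str(x) is PySem.Int.toChars; s[::-1] is List.reverse (PySem.Str.slice?_none_none_neg_one)
def isPalinArray_alt (arr : List Int) : Bool :=
  arr.all (fun x => PySem.Int.toChars x = (PySem.Int.toChars x).reverse)

-- ===== PRECONDITION & SPEC =====
def Spec_isPalinArray (arr : List Int) (out : Bool) : Prop := out = isPalinArray_alt arr
instance (arr : List Int) (out : Bool) : Decidable (Spec_isPalinArray arr out) := by unfold Spec_isPalinArray; infer_instance

-- ===== CLAIM (what is proved, stated in full; the proofs are below) =====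
def Claim_equal_isPalinArray : Prop := ∀ (arr : List Int), Dom_isPalinArray arr → Spec_isPalinArray arr (isPalinArray arr)

-- ===== LEMMAS AND PROOFS =====

-- revA, unfolded once
theorem revA_eq (n r : Int) :
    revA n r = if 0 < n then revA (PySem.Int.floordiv n 10) (r * 10 + PySem.Int.mod n 10) else r := by
  rw [revA]

-- the pure-Nat reversal accumulator over the little-endian digit list
def revNat (L : List Nat) (r : Nat) : Nat :=
  match L with
  | [] => r
  | d :: t => revNat t (r * 10 + d)

theorem revA_eq_revNat (n : Nat) : ∀ r : Nat, revA (n : Int) (r : Nat) = (revNat (Nat.digits 10 n) r : Int) := by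
  induction n using Nat.strong_induction_on with
  | _ n ih =>
    intro r
    rw [revA_eq]
    by_cases hn : 0 < n
    · simp only [hn, Int.natCast_pos, if_true]
      rw [Nat.digits_def' (by norm_num) hn, revNat]
      have hd : PySem.Int.floordiv (n : Int) 10 = ((n / 10 : Nat) : Int) := by
        exact_mod_cast PySem.Int.floordiv_natCast n 10
      have hm : PySem.Int.mod (n : Int) 10 = ((n % 10 : Nat) : Int) := by
        exact_mod_cast PySem.Int.mod_natCast n 10
      rw [hd, hm]
      have hcast : (r : Int) * 10 + ((n % 10 : Nat) : Int) = ((r * 10 + n % 10 : Nat) : Int) := by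
        push_cast; ring
      rw [hcast, ih (n / 10) (Nat.div_lt_self hn (by norm_num))]
    · have h0 : n = 0 := by omega
      subst h0
      norm_num [revNat]

theorem revNat_eq_ofDigits (L : List Nat) : ∀ r : Nat, revNat L r = Nat.ofDigits 10 L.reverse + r * 10 ^ L.length := by
  induction L with
  | nil => intro r; simp [revNat]
  | cons d t ih =>
    intro r
    rw [revNat, ih, List.reverse_cons, Nat.ofDigits_append]
    simp [Nat.ofDigits]
    ring

-- A's per-element test, characterised: for n > 0, n equals its arithmetic reversal iff
-- the little-endian digit list is a palindrome
theorem revA_palindrome (n : Nat) (hn : 0 < n) :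
    ((n : Int) = revA (n : Int) 0) ↔ Nat.digits 10 n = (Nat.digits 10 n).reverse := by
  have h0 : revA (n : Int) 0 = (revNat (Nat.digits 10 n) 0 : Int) := by
    have := revA_eq_revNat n 0
    simpa using this
  have h1 : revNat (Nat.digits 10 n) 0 = Nat.ofDigits 10 (Nat.digits 10 n).reverse := by
    rw [revNat_eq_ofDigits]; simp
  constructor
  · intro h
    have hnat : n = Nat.ofDigits 10 (Nat.digits 10 n).reverse := by
      rw [h0, h1] at h
      exact_mod_cast h
    by_cases hlast : n % 10 = 0
    · -- ones digit 0: the reversal drops a leading digit, so it is strictly smaller — contradiction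
      exfalso
      have hL := Nat.digits_def' (b := 10) (by norm_num) hn
      have hT : Nat.digits 10 n = 0 :: Nat.digits 10 (n / 10) := by rw [hL, hlast]
      have hrev : (Nat.digits 10 n).reverse = (Nat.digits 10 (n / 10)).reverse ++ [0] := by
        rw [hT]; simp
      have hof : Nat.ofDigits 10 (Nat.digits 10 n).reverse
          = Nat.ofDigits 10 (Nat.digits 10 (n / 10)).reverse := by
        rw [hrev, Nat.ofDigits_append]; simp [Nat.ofDigits]
      have hsmall : Nat.ofDigits 10 (Nat.digits 10 (n / 10)).reverse
          < 10 ^ (Nat.digits 10 (n / 10)).length := by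
        have := Nat.ofDigits_lt_base_pow_length (b := 10)
          (l := (Nat.digits 10 (n / 10)).reverse) (by norm_num)
          (fun x hx => Nat.digits_lt_base (by norm_num) (List.mem_reverse.mp hx))
        simpa using this
      have hbig : 10 ^ (Nat.digits 10 (n / 10)).length ≤ n := by
        rw [← Nat.lt_digits_length_iff (by norm_num)]
        rw [hT]; simp
      omega
    · -- ones digit ≠ 0: the reversed digit list is a valid digit expansion of n
      have hdig := Nat.digits_ofDigits 10 (by norm_num) (Nat.digits 10 n).reverse
        (fun l hl => Nat.digits_lt_base (by norm_num) (List.mem_reverse.mp hl))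
        (by
          intro hne
          have hh : (Nat.digits 10 n).reverse.getLast hne
              = (Nat.digits 10 n).head (by simpa using hne) := List.getLast_reverse hne
          rw [hh]
          have hL := Nat.digits_def' (b := 10) (by norm_num) hn
          simp [hL, hlast])
      rw [← hnat] at hdig
      exact hdig
  · intro h
    have hofd : Nat.ofDigits 10 (Nat.digits 10 n).reverse = n := by
      rw [← h, Nat.ofDigits_digits]
    rw [h0, h1, hofd]

-- digitChar is injective below 10
theorem digitChar_inj : ∀ a < 10, ∀ b < 10, Nat.digitChar a = Nat.digitChar b → a = b := by decide

theorem map_digitChar_inj (L : List Nat) : ∀ (M : List Nat), (∀ d ∈ L, d < 10) → (∀ d ∈ M, d < 10) →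
    L.map Nat.digitChar = M.map Nat.digitChar → L = M := by
  induction L with
  | nil =>
    intro M _ _ h
    cases M with
    | nil => rfl
    | cons m t => simp at h
  | cons d t ih =>
    intro M hL hM h
    cases M with
    | nil => simp at h
    | cons m s =>
      simp only [List.map_cons, List.cons.injEq] at h
      have hd : d = m := digitChar_inj d (hL d (by simp)) m (hM m (by simp)) h.1
      have ht : t = s := ih s (fun x hx => hL x (List.mem_cons_of_mem _ hx))
        (fun x hx => hM x (List.mem_cons_of_mem _ hx)) h.2
      rw [hd, ht]

-- Nat.toDigits is the reversed digitChar image of Nat.digits (for positive n)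
theorem toDigits_eq_digits (n : Nat) (hn : 0 < n) :
    Nat.toDigits 10 n = ((Nat.digits 10 n).map Nat.digitChar).reverse := by
  induction n using Nat.strong_induction_on with
  | _ n ih =>
    rw [Nat.toDigits_eq_if (by norm_num), Nat.digits_def' (b := 10) (by norm_num) hn]
    by_cases h : n < 10
    · have : n / 10 = 0 := Nat.div_eq_of_lt h
      simp [h, this, Nat.mod_eq_of_lt h]
    · have hpos : 0 < n / 10 := Nat.div_pos (by omega) (by norm_num)
      simp only [h, if_false]
      rw [ih (n / 10) (Nat.div_lt_self hn (by norm_num)) hpos]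
      simp

-- B's per-element test, characterised the same way (for positive n)
theorem toChars_palindrome (n : Nat) (hn : 0 < n) :
    (PySem.Int.toChars (n : Int) = (PySem.Int.toChars (n : Int)).reverse)
      ↔ Nat.digits 10 n = (Nat.digits 10 n).reverse := by
  have hnn : ¬ ((n : Int) < 0) := by omega
  have hchars : PySem.Int.toChars (n : Int) = Nat.toDigits 10 n := by
    simp [PySem.Int.toChars, hnn]
  rw [hchars, toDigits_eq_digits n hn, List.reverse_reverse]
  constructor
  · intro h
    apply map_digitChar_inj
    · exact fun d hd => Nat.digits_lt_base (by norm_num) hd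
    · exact fun d hd => Nat.digits_lt_base (by norm_num) (List.mem_reverse.mp hd)
    · rw [List.map_reverse]
      exact h.symm
  · intro h
    conv_rhs => rw [h]
    rw [List.map_reverse]

-- the two per-element tests agree on every integer
theorem elem_eq (x : Int) :
    (decide (x = revA x 0))
      = (decide (PySem.Int.toChars x = (PySem.Int.toChars x).reverse)) := by
  rcases lt_trichotomy x 0 with hneg | hzero | hpos
  · -- x < 0: A's loop never runs (r = 0 ≠ x); B's string starts with '-' and ends with a digit
    have hA : revA x 0 = 0 := by rw [revA_eq]; simp [not_lt.mpr (le_of_lt hneg)]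
    have hxne : ¬ (x = revA x 0) := by rw [hA]; omega
    have hchars : PySem.Int.toChars x = '-' :: Nat.toDigits 10 x.natAbs := by
      simp [PySem.Int.toChars, hneg]
    have hBne : ¬ (PySem.Int.toChars x = (PySem.Int.toChars x).reverse) := by
      intro h
      rw [hchars] at h
      have hM : Nat.toDigits 10 x.natAbs ≠ [] := by
        intro hc
        have := @Nat.length_toDigits_pos 10 x.natAbs
        rw [hc] at this; simp at this
      have hlast1 : ('-' :: Nat.toDigits 10 x.natAbs).getLast?
          = some ((Nat.toDigits 10 x.natAbs).getLast?.getD '-') := List.getLast?_cons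
      have hlast2 : (('-' :: Nat.toDigits 10 x.natAbs).reverse).getLast? = some '-' := by
        simp
      rw [h, hlast2] at hlast1
      obtain ⟨c, hc⟩ : ∃ c, (Nat.toDigits 10 x.natAbs).getLast? = some c := by
        cases hgl : (Nat.toDigits 10 x.natAbs).getLast? with
        | none => exact absurd (List.getLast?_eq_none_iff.mp hgl) hM
        | some c => exact ⟨c, rfl⟩
      have hcm : c = '-' := by
        rw [hc] at hlast1
        simpa using hlast1.symm
      have hmem : c ∈ Nat.toDigits 10 x.natAbs := List.mem_of_getLast? hc
      have hdig := Nat.isDigit_of_mem_toDigits (b := 10) (by norm_num) (by norm_num) hmem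
      rw [hcm] at hdig
      simp [Char.isDigit] at hdig
    simp [hxne, hBne]
  · -- x = 0: both tests succeed
    subst hzero
    have hA : revA 0 0 = 0 := by rw [revA_eq]; simp
    rw [hA]
    decide
  · -- x > 0
    obtain ⟨n, rfl⟩ : ∃ n : Nat, x = (n : Int) := ⟨x.toNat, (Int.toNat_of_nonneg (le_of_lt hpos)).symm⟩
    have hn : 0 < n := by exact_mod_cast hpos
    simp only [decide_eq_decide]
    rw [revA_palindrome n hn, toChars_palindrome n hn]

theorem ports_agree (arr : List Int) : isPalinArray arr = isPalinArray_alt arr := by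
  induction arr with
  | nil => rfl
  | cons x rest ih =>
    rw [isPalinArray, isPalinArray_alt, List.all_cons]
    have hkey := elem_eq x
    by_cases h : x = revA x 0
    · rw [if_neg (by simpa using h)]
      have hB : (decide (PySem.Int.toChars x = (PySem.Int.toChars x).reverse)) = true := by
        rw [← hkey]; exact decide_eq_true h
      rw [hB, Bool.true_and]
      exact ih
    · rw [if_pos h]
      have hB : (decide (PySem.Int.toChars x = (PySem.Int.toChars x).reverse)) = false := by
        rw [← hkey]; exact decide_eq_false h
      rw [hB, Bool.false_and]

-- ===== VERDICT (by name: the statement is the Claim_ definition above) =====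
theorem isPalinArray_spec : Claim_equal_isPalinArray := by
  intro arr _
  exact ports_agree arr
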